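-- pv_equiv track=rewrite | github.com/viniciusbuscacio/Ragner | Ragner/usecases/fazer_pergunta_usecase.py | analisar_comando
-- ===== SOURCE A (Python) =====
-- def analisar_comando(texto):
--     """
--     Analisa se o texto é um comando especial.
--
--     Args:
--         texto: Texto da entrada do usuário
--
--     Returns:
--         tuple: (bool é_comando, str comando, str argumento)
--     """
--     texto = texto.strip().lower()
--
--     # Comandos sem argumentos
--     comandos_simples = [
--         "sobre", "tutorial", "status", "status_tabela_arquivos",
--         "status_tabela_chunks", "status_faiss", "menu", "sair",
--         "recarregar_arquivos_da_pasta", "apagar_tudo", "configurar_api_key",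
--         "reconstruir_indice_faiss", "teste_vetor"
--     ]
--
--     for comando in comandos_simples:
--         if texto == comando:
--             return True, comando, None
--
--     # Comandos com argumentos
--     if texto.startswith("indice "):
--         partes = texto.split(" ", 1)
--         if len(partes) > 1:
--             return True, "indice", partes[1]
--
--     # Verificar se é o comando teste_vetor com argumento
--     if texto.startswith("teste_vetor "):
--         partes = texto.split(" ", 1)
--         if len(partes) > 1:
--             return True, "teste_vetor", partes[1]
--
--     # Não é um comando
--     return False, None, None
-- ===== SOURCE B (Python) =====
-- def analisar_comando(texto):
--     texto = texto.strip().lower()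
--     parts = texto.split(' ', 1)
--     if len(parts) == 1:
--         if parts[0] in {
--             "sobre", "tutorial", "status", "status_tabela_arquivos",
--             "status_tabela_chunks", "status_faiss", "menu", "sair",
--             "recarregar_arquivos_da_pasta", "apagar_tudo", "configurar_api_key",
--             "reconstruir_indice_faiss", "teste_vetor",
--         }:
--             return True, parts[0], None
--         return False, None, None
--     comando, argumento = parts[0], parts[1]
--     if comando in {"indice", "teste_vetor"}:
--         return True, comando, argumento
--     return False, None, None
-- ===== Notes on version B (the rewrite author's own statement) =====
-- stated objective: simpler
-- what changed: B splits the normalized text once with a single split at the first space and dispatches on the resulting command word, replacing A's sequential 13-way membership loop plus two separate startswith+split prefix passes.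
import Mathlib
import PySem

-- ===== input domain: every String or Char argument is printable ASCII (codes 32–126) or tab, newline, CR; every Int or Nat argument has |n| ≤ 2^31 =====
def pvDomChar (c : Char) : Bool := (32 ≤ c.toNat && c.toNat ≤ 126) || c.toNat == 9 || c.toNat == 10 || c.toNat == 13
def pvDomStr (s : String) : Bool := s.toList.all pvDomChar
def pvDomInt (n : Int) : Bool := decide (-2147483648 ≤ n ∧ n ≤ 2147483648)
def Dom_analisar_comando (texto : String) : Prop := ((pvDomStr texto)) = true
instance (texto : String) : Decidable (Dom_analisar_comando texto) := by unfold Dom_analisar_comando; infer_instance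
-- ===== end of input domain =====

-- B replaces A's sequential membership loop plus two startswith+split passes by a single
-- split at the first space followed by a dispatch on the resulting command word (objective: simpler).


-- ===== PORT A =====
def pvComandosSimples : List String :=
  ["sobre", "tutorial", "status", "status_tabela_arquivos",
   "status_tabela_chunks", "status_faiss", "menu", "sair",
   "recarregar_arquivos_da_pasta", "apagar_tudo", "configurar_api_key",
   "reconstruir_indice_faiss", "teste_vetor"]

-- the 'for comando in comandos_simples: if texto == comando: return …' loop
def pvLoopSimples (texto : String) : List String → Option String
  | [] => none
  | c :: rest => if texto == c then some c else pvLoopSimples texto rest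

-- the code after the 'indice' block (the 'teste_vetor' check and the final return)
def pvChecaTesteVetor (texto : String) : Bool × Option String × Option String :=
  if PySem.Str.startswith texto "teste_vetor " then
    let partes := (PySem.Str.splitMax? texto " " 1).getD []   -- sep " " ≠ "", never none
    if partes.length > 1 then (true, some "teste_vetor", PySem.List.pyGet? partes 1)
    else (false, none, none)
  else (false, none, none)

def analisar_comando (texto : String) : Bool × Option String × Option String :=
  let t := PySem.Str.lower (PySem.Str.strip texto)
  match pvLoopSimples t pvComandosSimples with
  | some comando => (true, some comando, none)
  | none =>
    if PySem.Str.startswith t "indice " then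
      let partes := (PySem.Str.splitMax? t " " 1).getD []   -- sep " " ≠ "", never none
      if partes.length > 1 then (true, some "indice", PySem.List.pyGet? partes 1)
      else pvChecaTesteVetor t
    else pvChecaTesteVetor t

-- ===== PORT B =====
def pvComandosSimplesSet : PySem.Set String :=
  PySem.Set.ofList
    ["sobre", "tutorial", "status", "status_tabela_arquivos",
     "status_tabela_chunks", "status_faiss", "menu", "sair",
     "recarregar_arquivos_da_pasta", "apagar_tudo", "configurar_api_key",
     "reconstruir_indice_faiss", "teste_vetor"]

def analisar_comando_alt (texto : String) : Bool × Option String × Option String :=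
  let t := PySem.Str.lower (PySem.Str.strip texto)
  match (PySem.Str.splitMax? t " " 1).getD [] with   -- parts = first-space split; sep ≠ "", never none
  | [comando] =>                                     -- len(parts) == 1
    if PySem.Set.contains pvComandosSimplesSet comando then (true, some comando, none)
    else (false, none, none)
  | comando :: argumento :: _ =>                     -- comando, argumento = parts[0], parts[1]
    if comando == "indice" || comando == "teste_vetor" then (true, some comando, some argumento)
    else (false, none, none)
  | [] => (false, none, none)                        -- unreachable: split always returns ≥ 1 piece

-- ===== PRECONDITION & SPEC =====
def Spec_analisar_comando (texto : String) (out : Bool × Option String × Option String) : Prop := out = analisar_comando_alt texto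
instance (texto : String) (out : Bool × Option String × Option String) : Decidable (Spec_analisar_comando texto out) := by unfold Spec_analisar_comando; infer_instance

-- ===== CLAIM (what is proved, stated in full; the proofs are below) =====
def Claim_equal_analisar_comando : Prop := ∀ (texto : String), Dom_analisar_comando texto → Spec_analisar_comando texto (analisar_comando texto)

-- ===== LEMMAS AND PROOFS =====

theorem pvLoopSimples_eq (t : String) (l : List String) :
    pvLoopSimples t l = if t ∈ l then some t else none := by
  induction l with
  | nil => simp [pvLoopSimples]
  | cons c rest ih =>
    by_cases h : t = c
    · subst h; simp [pvLoopSimples]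
    · simp [pvLoopSimples, h, ih]

-- go with maxsplit budget 0: no further split happens
theorem pv_go_zero (fuel : Nat) (l cur : List Char) (acc : List (List Char)) :
    PySem.Chars.splitOnMax.go [' '] fuel 0 l cur acc = ((cur.reverse ++ l) :: acc).reverse := by
  cases fuel with
  | zero => simp [PySem.Chars.splitOnMax.go]
  | succ f => cases l <;> simp [PySem.Chars.splitOnMax.go]

-- go with budget 1 splits at the first space, if any
theorem pv_go_one (fuel : Nat) (l cur : List Char) (acc : List (List Char)) (h : l.length < fuel) :
    PySem.Chars.splitOnMax.go [' '] fuel 1 l cur acc =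
      if ' ' ∈ l then
        acc.reverse ++ [cur.reverse ++ l.takeWhile (fun c => !(c == ' ')),
                        (l.dropWhile (fun c => !(c == ' '))).tail]
      else acc.reverse ++ [cur.reverse ++ l] := by
  induction fuel generalizing l cur acc with
  | zero => omega
  | succ f ih =>
    cases l with
    | nil => simp [PySem.Chars.splitOnMax.go]
    | cons c rest =>
      by_cases hc : c = ' '
      · subst hc
        simp [PySem.Chars.splitOnMax.go, pv_go_zero, List.takeWhile, List.dropWhile]
      · have hb : (c == ' ') = false := by simp [hc]
        have : rest.length < f := by simpa using h
        simp [PySem.Chars.splitOnMax.go, hb, Ne.symm hc, ih rest (c :: cur) acc this,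
              List.takeWhile, List.dropWhile, List.append_assoc]

theorem pv_splitOnMax_one (cs : List Char) :
    PySem.Chars.splitOnMax cs [' '] 1 =
      if ' ' ∈ cs then
        [cs.takeWhile (fun c => !(c == ' ')), (cs.dropWhile (fun c => !(c == ' '))).tail]
      else [cs] := by
  rw [PySem.Chars.splitOnMax]
  norm_num
  rw [pv_go_one (cs.length + 1) cs [] [] (by omega)]
  split <;> simp

-- a string containing a space decomposes as takeWhile ++ ' ' :: tail-of-dropWhile
theorem pv_span_space (cs : List Char) (h : ' ' ∈ cs) :
    ∃ v, cs = cs.takeWhile (fun c => !(c == ' ')) ++ ' ' :: v ∧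
         cs.dropWhile (fun c => !(c == ' ')) = ' ' :: v := by
  induction cs with
  | nil => simp at h
  | cons c rest ih =>
    by_cases hc : c = ' '
    · subst hc; exact ⟨rest, by simp [List.takeWhile, List.dropWhile]⟩
    · have hb : (c == ' ') = false := by simp [hc]
      have hr : ' ' ∈ rest := by
        rcases List.mem_cons.mp h with h' | h'
        · exact absurd h'.symm hc
        · exact h'
      obtain ⟨v, hv1, hv2⟩ := ih hr
      refine ⟨v, ?_, ?_⟩
      · simp only [List.takeWhile, hb]
        nth_rewrite 1 [hv1]; rfl
      · simpa [List.dropWhile, hb] using hv2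

theorem pv_takeWhile_of_append (u v : List Char) (hu : ' ' ∉ u) :
    (u ++ ' ' :: v).takeWhile (fun c => !(c == ' ')) = u := by
  induction u with
  | nil => simp
  | cons a u ih =>
    have ha : a ≠ ' ' := fun h => hu (by simp [h])
    simp only [List.mem_cons, not_or] at hu
    simp [ha, ih hu.2]

-- startswith "<u> " detects exactly that the first space-delimited word is u
theorem pv_prefix_space_iff (u cs : List Char) (hu : ' ' ∉ u) (hcs : ' ' ∈ cs) :
    (u ++ [' ']).isPrefixOf cs = true ↔ cs.takeWhile (fun c => !(c == ' ')) = u := by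
  rw [List.isPrefixOf_iff_prefix]
  constructor
  · rintro ⟨w, hw⟩
    rw [← hw, List.append_assoc]
    simpa using pv_takeWhile_of_append u w hu
  · intro h
    obtain ⟨v, hv, -⟩ := pv_span_space cs hcs
    rw [h] at hv
    exact ⟨v, by simp [hv]⟩

theorem pv_prefix_space_false (u cs : List Char) (hcs : ' ' ∉ cs) :
    (u ++ [' ']).isPrefixOf cs = false := by
  by_contra h
  have : (u ++ [' ']) <+: cs := List.isPrefixOf_iff_prefix.mp (by simpa using h)
  exact hcs (this.sublist.mem (by simp))

-- ===== VERDICT (by name: the statement is the Claim_ definition above) =====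
theorem pv_no_space_in_simples : ∀ c ∈ pvComandosSimples, ' ' ∉ c.toList := by decide

theorem pv_set_eq_list : pvComandosSimplesSet = pvComandosSimples := by decide

theorem pv_ofList_ne (u : List Char) (w : String) (h : u ≠ w.toList) :
    (String.ofList u == w) = false := by
  simp only [beq_eq_false_iff_ne, ne_eq]
  intro he
  exact h (by rw [← he, String.toList_ofList])

theorem analisar_comando_spec : Claim_equal_analisar_comando := by
  intro texto _
  unfold Spec_analisar_comando analisar_comando analisar_comando_alt
  generalize PySem.Str.lower (PySem.Str.strip texto) = s
  by_cases hsp : ' ' ∈ s.toList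
  · -- the stripped text contains a space: no simple command matches
    obtain ⟨v, hv, hd⟩ := pv_span_space s.toList hsp
    have hunosp : ' ' ∉ s.toList.takeWhile (fun c => !(c == ' ')) := fun hm => by
      simpa using List.mem_takeWhile_imp hm
    have hparts : (PySem.Str.splitMax? s " " 1).getD [] =
        [String.ofList (s.toList.takeWhile (fun c => !(c == ' '))), String.ofList v] := by
      simp [PySem.Str.splitMax?, PySem.Chars.splitMax?, pv_splitOnMax_one, hsp, hd]
    have hloop : pvLoopSimples s pvComandosSimples = none := by
      rw [pvLoopSimples_eq, if_neg]
      intro hmem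
      exact pv_no_space_in_simples s hmem hsp
    have hsw : ∀ w : String, ' ' ∉ w.toList →
        (PySem.Chars.startswith s.toList (w.toList ++ [' ']) = true ↔
          s.toList.takeWhile (fun c => !(c == ' ')) = w.toList) := by
      intro w hw
      simp only [PySem.Chars.startswith]
      exact pv_prefix_space_iff w.toList s.toList hw hsp
    have hswi := hsw "indice" (by decide)
    have hswt := hsw "teste_vetor" (by decide)
    by_cases hiu : s.toList.takeWhile (fun c => !(c == ' ')) = "indice".toList
    · rw [hiu] at hparts
      have hI : PySem.Chars.startswith s.toList ['i','n','d','i','c','e',' '] = true := by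
        simpa using hswi.mpr hiu
      simp [hloop, hI, hparts, PySem.List.pyGet?, PySem.List.pyIdx?]
    · have hswi' : PySem.Chars.startswith s.toList ("indice".toList ++ [' ']) = false := by
        cases hb : PySem.Chars.startswith s.toList ("indice".toList ++ [' ']) with
        | false => rfl
        | true => exact absurd (hswi.mp hb) hiu
      by_cases htu : s.toList.takeWhile (fun c => !(c == ' ')) = "teste_vetor".toList
      · rw [htu] at hparts
        have hI : PySem.Chars.startswith s.toList
            ['t','e','s','t','e','_','v','e','t','o','r',' '] = true := by
          simpa using hswt.mpr htu
        have hF : PySem.Chars.startswith s.toList ['i','n','d','i','c','e',' '] = false := by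
          simpa using hswi'
        simp [hloop, pvChecaTesteVetor, hF, hI, hparts,
              PySem.List.pyGet?, PySem.List.pyIdx?]
      · have hswt' : PySem.Chars.startswith s.toList ("teste_vetor".toList ++ [' ']) = false := by
          cases hb : PySem.Chars.startswith s.toList ("teste_vetor".toList ++ [' ']) with
          | false => rfl
          | true => exact absurd (hswt.mp hb) htu
        have hF1 : PySem.Chars.startswith s.toList ['i','n','d','i','c','e',' '] = false := by
          simpa using hswi'
        have hF2 : PySem.Chars.startswith s.toList
            ['t','e','s','t','e','_','v','e','t','o','r',' '] = false := by
          simpa using hswt'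
        simp [hloop, pvChecaTesteVetor, hF1, hF2, hparts,
              pv_ofList_ne _ _ hiu, pv_ofList_ne _ _ htu]
  · -- no space: the whole text is the candidate command word
    have hparts : (PySem.Str.splitMax? s " " 1).getD [] = [s] := by
      simp [PySem.Str.splitMax?, PySem.Chars.splitMax?, pv_splitOnMax_one, hsp,
            String.ofList_toList]
    have hswi : PySem.Chars.startswith s.toList ['i','n','d','i','c','e',' '] = false := by
      simpa [PySem.Chars.startswith] using pv_prefix_space_false "indice".toList s.toList hsp
    have hswt : PySem.Chars.startswith s.toList
        ['t','e','s','t','e','_','v','e','t','o','r',' '] = false := by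
      simpa [PySem.Chars.startswith] using pv_prefix_space_false "teste_vetor".toList s.toList hsp
    by_cases hm : s ∈ pvComandosSimples
    · simp [pvLoopSimples_eq, hm, hparts, pv_set_eq_list]
    · simp [pvLoopSimples_eq, hm, hparts, pv_set_eq_list, pvChecaTesteVetor, hswi, hswt]
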